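-- pv_equiv track=rewrite | github.com/fjlein/aoc | aoc23/5/main.py | part2
-- ===== SOURCE A (Python) =====
-- def part2(data):
--     seeds, maps = data
--     ranges = []
--     for i, s in enumerate(seeds[::2]):
--         ranges.append((s, s+seeds[i*2+1] - 1))
--
--     for m in maps:
--         next_ranges = []
--         while len(ranges) != 0:
--             current = ranges.pop()
--             seed_from, seed_to = current
--             start_in_map = False
--             for row in m:
--                 dest, source, l = row
--                 if seed_from >= source and seed_from < source + l:  # range start is in map
--                     start_in_map = True
--                     if seed_to < source + l:  # completely in map
--                         next_ranges.append(
--                             (seed_from + dest - source, seed_to + dest - source))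
--                     else:  # partial in map
--                         next_ranges.append(
--                             (seed_from + dest - source, source + l - 1 + dest - source))
--                         ranges.append((source + l, seed_to))
--                     break
--             if not start_in_map:
--                 if seed_from < m[0][1]:  # start before all maps
--                     if seed_to < m[0][1]:
--                         next_ranges.append(current)
--                     else:
--                         next_ranges.append((seed_from, m[0][1] - 1))
--                         ranges.append((m[0][1], seed_to))
--                 else:  # start after all maps
--                     next_ranges.append(current)
--         ranges = next_ranges
--
--     return sorted(ranges, key=lambda x: x[0])[0][0]
-- ===== SOURCE B (Python) =====
-- def find_row(lo, m):
--     for row in m: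
--         dest, source, l = row
--         if source <= lo < source + l:
--             return row
--     return None
--
--
-- def map_range(lo, hi, m):
--     row = find_row(lo, m)
--     if row is not None:
--         dest, source, l = row
--         if hi < source + l:
--             return [(lo + dest - source, hi + dest - source)]
--         return [(lo + dest - source, dest + l - 1)] + map_range(source + l, hi, m)
--     b = m[0][1]
--     if lo < b:
--         if hi < b:
--             return [(lo, hi)]
--         return [(lo, b - 1)] + map_range(b, hi, m)
--     return [(lo, hi)]
--
--
-- def part2(data):
--     seeds, maps = data
--     ranges = [(s, s + n - 1) for s, n in zip(seeds[::2], seeds[1::2])]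
--     for m in maps:
--         ranges = [r for lo, hi in ranges for r in map_range(lo, hi, m)]
--     return min(lo for lo, hi in ranges)
-- ===== Notes on version B (the rewrite author's own statement) =====
-- stated objective: simpler
-- what changed: Replaces A's explicit while/pop work-stack with a recursive per-interval helper map_range flat-mapped over the ranges list, and returns the minimum start directly instead of sorting and indexing.
import Mathlib
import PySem

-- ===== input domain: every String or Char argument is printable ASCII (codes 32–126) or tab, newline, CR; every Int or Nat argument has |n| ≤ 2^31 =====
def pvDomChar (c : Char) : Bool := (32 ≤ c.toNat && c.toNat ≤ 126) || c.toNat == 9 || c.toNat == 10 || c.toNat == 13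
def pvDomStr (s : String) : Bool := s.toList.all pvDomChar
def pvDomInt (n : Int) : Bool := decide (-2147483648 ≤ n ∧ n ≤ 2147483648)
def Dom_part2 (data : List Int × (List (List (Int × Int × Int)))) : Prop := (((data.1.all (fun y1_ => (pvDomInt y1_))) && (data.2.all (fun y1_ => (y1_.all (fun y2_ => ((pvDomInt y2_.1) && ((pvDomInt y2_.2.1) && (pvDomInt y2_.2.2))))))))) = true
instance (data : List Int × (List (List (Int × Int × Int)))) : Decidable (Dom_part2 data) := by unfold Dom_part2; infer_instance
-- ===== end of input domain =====

-- B re-decomposes A's explicit while/pop interval stack into a recursive per-interval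
-- helper map_range flat-mapped over the ranges, and returns min of starts instead of sort-then-index
-- (objective: simpler; same exact value on every input A returns on).

-- ===== PORT A =====

-- weight of an interval, used only for termination of the while-loop port
def pvW (r : Int × Int) : Nat := (r.2 - r.1).toNat

-- A's inner `for row in m: … break` loop: returns none if no row matched, else
-- (the appended next_range, the optionally pushed-back remainder range).
def scanA (lo hi : Int) : List (Int × Int × Int) → Option ((Int × Int) × Option (Int × Int))
  | [] => none
  | (dest, source, l) :: rest =>
    if lo ≥ source ∧ lo < source + l then
      some (if hi < source + l then ((lo + dest - source, hi + dest - source), none)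
            else ((lo + dest - source, source + l - 1 + dest - source), some (source + l, hi)))
    else scanA lo hi rest

-- facts needed for loopA's termination, proved before it so decreasing_by can cite them
theorem pop_last_eq {α : Type} (xs : List α) (x : α) (r : List α)
    (h : PySem.List.pop? xs = some (x, r)) : xs = r ++ [x] := by
  induction xs using List.reverseRecOn with
  | nil => simp [PySem.List.pop?, PySem.List.pyIdx?] at h
  | append_singleton ys y _ =>
    rw [PySem.List.pop?_last] at h
    obtain ⟨rfl, rfl⟩ : y = x ∧ ys = r := by simpa using h
    rfl

theorem scanA_push (lo hi : Int) (m : List (Int × Int × Int)) (nr q : Int × Int)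
    (h : scanA lo hi m = some (nr, some q)) : lo < q.1 ∧ q.1 ≤ hi ∧ q.2 = hi := by
  induction m with
  | nil => simp [scanA] at h
  | cons row rest ih =>
    obtain ⟨d, s, l⟩ := row
    by_cases hc : lo ≥ s ∧ lo < s + l
    · by_cases h2 : hi < s + l <;> simp [scanA, hc, h2] at h
      obtain ⟨-, rfl⟩ := h
      refine ⟨by omega, by omega, rfl⟩
    · rw [scanA, if_neg hc] at h
      exact ih h

-- A's while-loop over the stack `ranges` (pop from the end, push back to the end),
-- accumulating `next_ranges`
def loopA (m : List (Int × Int × Int)) (stack next : List (Int × Int)) : List (Int × Int) :=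
  match h : PySem.List.pop? stack with
  | none => next
  | some ((lo, hi), rest) =>
    match hs : scanA lo hi m with
    | some (nr, none) => loopA m rest (next ++ [nr])
    | some (nr, some pb) => loopA m (rest ++ [pb]) (next ++ [nr])
    | none =>
      -- m[0][1]; the default 0 is unreachable under Pre_ (every map nonempty)
      let b := (PySem.List.pyGet? m 0).elim 0 (fun r => r.2.1)
      if lo < b then
        if hi < b then loopA m rest (next ++ [(lo, hi)])
        else loopA m (rest ++ [(b, hi)]) (next ++ [(lo, b - 1)])
      else loopA m rest (next ++ [(lo, hi)])
termination_by (stack.map pvW).sum + stack.length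
decreasing_by
  all_goals
    have hst := pop_last_eq _ _ _ h
    subst hst
    simp [List.map_append, List.sum_append, pvW]
  · omega
  · have := scanA_push lo hi m nr pb hs
    omega
  · omega
  · rename_i hlt hge
    omega
  · omega

def part2 (data : List Int × (List (List (Int × Int × Int)))) : Int :=
  let seeds := data.1
  let maps := data.2
  -- ranges built by the enumerate loop; seeds[i*2+1] as pyGetD (in range under Pre_)
  let ranges := (PySem.List.enumerate ((PySem.List.slice? seeds none none 2).getD [])).foldl
    (fun acc p => acc ++ [(p.2, p.2 + PySem.List.pyGetD seeds (p.1 * 2 + 1) 0 - 1)]) []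
  let final := maps.foldl (fun rs m => loopA m rs []) ranges
  -- sorted(final, key=x[0])[0][0]; the default 0 is unreachable under Pre_ (final nonempty)
  (PySem.List.pyGet? (PySem.List.sorted final (fun x => x.1)) 0).elim 0 (fun r => r.1)

-- ===== PORT B =====

-- first row of m whose source range contains lo (Source B's find_row)
def findRow (lo : Int) : List (Int × Int × Int) → Option (Int × Int × Int)
  | [] => none
  | row :: rest =>
    if row.2.1 ≤ lo ∧ lo < row.2.1 + row.2.2 then some row else findRow lo rest

theorem findRow_spec (lo : Int) (m : List (Int × Int × Int)) (row : Int × Int × Int)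
    (h : findRow lo m = some row) : row.2.1 ≤ lo ∧ lo < row.2.1 + row.2.2 := by
  induction m with
  | nil => simp [findRow] at h
  | cons r rest ih =>
    by_cases hc : r.2.1 ≤ lo ∧ lo < r.2.1 + r.2.2
    · rw [findRow, if_pos hc] at h
      cases h; exact hc
    · rw [findRow, if_neg hc] at h
      exact ih h

-- Source B's map_range: map one inclusive interval [lo, hi] through m, recursing on the tail
def mapRange (lo hi : Int) (m : List (Int × Int × Int)) : List (Int × Int) :=
  match hf : findRow lo m with
  | some (dest, source, l) =>
    if hi < source + l then [(lo + dest - source, hi + dest - source)]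
    else (lo + dest - source, dest + l - 1) :: mapRange (source + l) hi m
  | none =>
    -- m[0][1]; the default 0 is unreachable under Pre_ (every map nonempty)
    let b := (PySem.List.pyGet? m 0).elim 0 (fun r => r.2.1)
    if lo < b then
      if hi < b then [(lo, hi)]
      else (lo, b - 1) :: mapRange b hi m
    else [(lo, hi)]
termination_by (hi - lo).toNat
decreasing_by
  · have := findRow_spec lo m _ hf
    simp at this
    omega
  · rename_i hlt hge
    omega

def part2_alt (data : List Int × (List (List (Int × Int × Int)))) : Int :=
  let seeds := data.1
  let evens := (PySem.List.slice? seeds none none 2).getD []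
  let odds := (PySem.List.slice? seeds (some 1) none 2).getD []
  let ranges := (evens.zip odds).map (fun p => (p.1, p.1 + p.2 - 1))
  let final := data.2.foldl (fun rs m => rs.flatMap (fun r => mapRange r.1 r.2 m)) ranges
  -- min(lo for lo, hi in final); the default 0 is unreachable under Pre_
  (PySem.List.min? (final.map (fun r => r.1)) (fun x => x)).getD 0

-- ===== PRECONDITION & SPEC =====
-- Pre_ excludes exactly the inputs where the Python A raises: empty or odd-length seeds
-- (IndexError on seeds[i*2+1] or on sorted(...)[0]) and any empty map (IndexError on m[0]).
def Pre_part2 (data : List Int × (List (List (Int × Int × Int)))) : Prop :=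
  data.1 ≠ [] ∧ data.1.length % 2 = 0 ∧ ∀ m ∈ data.2, m ≠ []
instance (data : List Int × (List (List (Int × Int × Int)))) : Decidable (Pre_part2 data) := by
  unfold Pre_part2; infer_instance

def pvWitness_part2 : (List Int × (List (List (Int × Int × Int)))) :=
  ([79, 14, 55, 13], [[(50, 98, 2), (52, 50, 48)], [(0, 15, 37), (37, 52, 2)]])

def Spec_part2 (data : List Int × (List (List (Int × Int × Int)))) (out : Int) : Prop := out = part2_alt data
instance (data : List Int × (List (List (Int × Int × Int)))) (out : Int) : Decidable (Spec_part2 data out) := by unfold Spec_part2; infer_instance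

-- ===== CLAIM (what is proved, stated in full; the proofs are below) =====
def Claim_equal_part2 : Prop := ∀ (data : List Int × (List (List (Int × Int × Int)))), Dom_part2 data → Pre_part2 data → Spec_part2 data (part2 data)

-- ===== LEMMAS AND PROOFS =====

-- scanA is findRow plus the arithmetic of the matched row
theorem scanA_eq_findRow (lo hi : Int) (m : List (Int × Int × Int)) :
    scanA lo hi m = (findRow lo m).map (fun row =>
      if hi < row.2.1 + row.2.2 then
        ((lo + row.1 - row.2.1, hi + row.1 - row.2.1), none)
      else
        ((lo + row.1 - row.2.1, row.2.1 + row.2.2 - 1 + row.1 - row.2.1),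
          some (row.2.1 + row.2.2, hi))) := by
  induction m with
  | nil => simp [scanA, findRow]
  | cons row rest ih =>
    obtain ⟨d, s, l⟩ := row
    by_cases hc : s ≤ lo ∧ lo < s + l
    · have hc' : lo ≥ s ∧ lo < s + l := hc
      rw [scanA, if_pos hc', findRow, if_pos hc]
      simp
    · have hc' : ¬ (lo ≥ s ∧ lo < s + l) := hc
      rw [scanA, if_neg hc', findRow, if_neg hc]
      exact ih

-- one-step unfolding lemmas (the ports use dependent matches, unfolded here once and for all)
theorem mapRange_found (lo hi : Int) (m : List (Int × Int × Int)) (dest source l : Int)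
    (hf : findRow lo m = some (dest, source, l)) :
    mapRange lo hi m =
      if hi < source + l then [(lo + dest - source, hi + dest - source)]
      else (lo + dest - source, dest + l - 1) :: mapRange (source + l) hi m := by
  rw [mapRange]
  split
  · rename_i d' s' l' heq
    rw [hf] at heq
    simp only [Option.some.injEq, Prod.mk.injEq] at heq
    obtain ⟨rfl, rfl, rfl⟩ := heq
    rfl
  · rename_i heq
    rw [hf] at heq
    cases heq

theorem mapRange_notfound (lo hi : Int) (m : List (Int × Int × Int))
    (hf : findRow lo m = none) :
    mapRange lo hi m =
      (let b := (PySem.List.pyGet? m 0).elim 0 (fun r => r.2.1)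
       if lo < b then
         if hi < b then [(lo, hi)]
         else (lo, b - 1) :: mapRange b hi m
       else [(lo, hi)]) := by
  rw [mapRange]
  split
  · rename_i d' s' l' heq
    rw [hf] at heq
    cases heq
  · rfl

theorem loopA_nil (m : List (Int × Int × Int)) (next : List (Int × Int)) :
    loopA m [] next = next := by
  rw [loopA]
  split
  · rfl
  · rename_i heq
    simp [PySem.List.pop?, PySem.List.pyIdx?] at heq

theorem loopA_snoc (m : List (Int × Int × Int)) (stack next : List (Int × Int)) (lo hi : Int) :
    loopA m (stack ++ [(lo, hi)]) next =
      match scanA lo hi m with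
      | some (nr, none) => loopA m stack (next ++ [nr])
      | some (nr, some pb) => loopA m (stack ++ [pb]) (next ++ [nr])
      | none =>
        let b := (PySem.List.pyGet? m 0).elim 0 (fun r => r.2.1)
        if lo < b then
          if hi < b then loopA m stack (next ++ [(lo, hi)])
          else loopA m (stack ++ [(b, hi)]) (next ++ [(lo, b - 1)])
        else loopA m stack (next ++ [(lo, hi)])
      := by
  rw [loopA]
  split
  · rename_i heq
    rw [PySem.List.pop?_last] at heq
    cases heq
  · rename_i lo' hi' rest heq
    rw [PySem.List.pop?_last] at heq
    simp only [Option.some.injEq, Prod.mk.injEq] at heq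
    obtain ⟨⟨h1, h2⟩, h3⟩ := heq
    subst h1; subst h2; subst h3
    split
    all_goals rename_i heq; rw [heq]

-- popping one interval off the stack and running it to exhaustion appends exactly mapRange of it
theorem loopA_pop_eq (lo hi : Int) (m : List (Int × Int × Int)) :
    ∀ stack next, loopA m (stack ++ [(lo, hi)]) next = loopA m stack (next ++ mapRange lo hi m) := by
  induction lo using mapRange.induct (hi := hi) (m := m) with
  | case1 x dest source l hf hlt =>
    intro stack next
    rw [loopA_snoc, mapRange_found x hi m dest source l hf]
    simp only [scanA_eq_findRow, hf, Option.map_some, if_pos hlt]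
  | case2 x dest source l hf hge ih =>
    intro stack next
    rw [loopA_snoc, mapRange_found x hi m dest source l hf]
    simp only [scanA_eq_findRow, hf, Option.map_some, if_neg hge]
    rw [ih]
    have harith : source + l - 1 + dest - source = dest + l - 1 := by ring
    rw [harith]
    simp
  | case3 x hf b hb hhb =>
    intro stack next
    rw [loopA_snoc, mapRange_notfound x hi m hf]
    simp only [scanA_eq_findRow, hf, Option.map_none]
    have hbe : b = (PySem.List.pyGet? m 0).elim 0 (fun r => r.2.1) := rfl
    rw [← hbe]
    simp only [if_pos hb, if_pos hhb]
  | case4 x hf b hb hhb ih =>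
    intro stack next
    rw [loopA_snoc, mapRange_notfound x hi m hf]
    simp only [scanA_eq_findRow, hf, Option.map_none]
    have hbe : b = (PySem.List.pyGet? m 0).elim 0 (fun r => r.2.1) := rfl
    rw [← hbe]
    simp only [if_pos hb, if_neg hhb]
    rw [ih]
    simp
  | case5 x hf b hb =>
    intro stack next
    rw [loopA_snoc, mapRange_notfound x hi m hf]
    simp only [scanA_eq_findRow, hf, Option.map_none]
    have hbe : b = (PySem.List.pyGet? m 0).elim 0 (fun r => r.2.1) := rfl
    rw [← hbe]
    simp only [if_neg hb]

-- the whole while loop is next ++ flatMap of mapRange over the reversed stack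
theorem loopA_flat (m : List (Int × Int × Int)) (stack next : List (Int × Int)) :
    loopA m stack next = next ++ stack.reverse.flatMap (fun r => mapRange r.1 r.2 m) := by
  induction stack using List.reverseRecOn generalizing next with
  | nil => rw [loopA_nil]; simp
  | append_singleton ys r ih =>
    obtain ⟨lo, hi⟩ := r
    rw [loopA_pop_eq, ih]
    simp

-- mapRange never returns the empty list
theorem mapRange_ne_nil (lo hi : Int) (m : List (Int × Int × Int)) :
    mapRange lo hi m ≠ [] := by
  rw [mapRange]
  cases hf : findRow lo m with
  | none => simp; split_ifs <;> simp
  | some row => obtain ⟨d, s, l⟩ := row; simp; split_ifs <;> simp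

theorem flatMap_ne_nil (rs : List (Int × Int)) (m : List (Int × Int × Int)) (h : rs ≠ []) :
    rs.flatMap (fun r => mapRange r.1 r.2 m) ≠ [] := by
  cases rs with
  | nil => exact absurd rfl h
  | cons r rest =>
    simp only [List.flatMap_cons]
    intro hcontra
    exact mapRange_ne_nil r.1 r.2 m (List.append_eq_nil_iff.mp hcontra).1

theorem foldl_flat_ne_nil (maps : List (List (Int × Int × Int))) (rs : List (Int × Int)) (h : rs ≠ []) :
    maps.foldl (fun rs m => rs.flatMap (fun r => mapRange r.1 r.2 m)) rs ≠ [] := by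
  induction maps generalizing rs with
  | nil => exact h
  | cons m rest ih => exact ih _ (flatMap_ne_nil rs m h)

-- A's fold (stack machine) is a permutation of B's fold (flatMap)
theorem fold_perm (maps : List (List (Int × Int × Int))) (rsA rsB : List (Int × Int))
    (hp : rsA.Perm rsB) :
    (maps.foldl (fun rs m => loopA m rs []) rsA).Perm
      (maps.foldl (fun rs m => rs.flatMap (fun r => mapRange r.1 r.2 m)) rsB) := by
  induction maps generalizing rsA rsB with
  | nil => exact hp
  | cons m rest ih =>
    refine ih _ _ ?_
    show (loopA m rsA []).Perm _
    rw [loopA_flat]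
    simp only [List.nil_append]
    exact List.Perm.flatMap ((rsA.reverse_perm).trans hp) (fun a _ => List.Perm.refl _)

-- characterizations of the two stride-2 slices
theorem slice_evens (xs : List Int) :
    (PySem.List.slice? xs none none 2).getD [] =
      (List.range ((xs.length + 1) / 2)).map (fun k => xs.getD (2 * k) 0) := by
  rw [PySem.List.slice?]
  simp only [PySem.List.sliceIndices]
  norm_num
  have hc : (if 0 < xs.length then (((xs.length : Int) + 2 - 1) / 2).toNat else 0)
      = (xs.length + 1) / 2 := by split_ifs with h <;> omega
  rw [hc, ← List.filterMap_eq_map (f := fun k => (xs[2 * k]?).getD 0)]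
  refine List.filterMap_congr ?_
  intro a ha
  simp only [List.mem_range] at ha
  have h2a : 2 * a < xs.length := by omega
  have ht : (2 * (a : Int)).toNat = 2 * a := by omega
  rw [ht, Function.comp_apply, List.getElem?_eq_getElem h2a]
  simp

theorem slice_odds (xs : List Int) :
    (PySem.List.slice? xs (some 1) none 2).getD [] =
      (List.range (xs.length / 2)).map (fun k => xs.getD (2 * k + 1) 0) := by
  rw [PySem.List.slice?]
  simp only [PySem.List.sliceIndices]
  norm_num
  have hc : (if 1 < xs.length then (((xs.length : Int) - min 1 (xs.length : Int) + 2 - 1) / 2).toNat else 0)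
      = xs.length / 2 := by split_ifs with h <;> omega
  rw [hc, ← List.filterMap_eq_map (f := fun k => (xs[2 * k + 1]?).getD 0)]
  refine List.filterMap_congr ?_
  intro a ha
  simp only [List.mem_range] at ha
  have h2a : 2 * a + 1 < xs.length := by omega
  have ht : (min 1 (xs.length : Int) + 2 * (a : Int)).toNat = 2 * a + 1 := by omega
  rw [ht, Function.comp_apply, List.getElem?_eq_getElem h2a]
  simp

-- the two initial range lists are equal whenever seeds has even length
theorem init_eq (seeds : List Int) (h2 : seeds.length % 2 = 0) :
    (PySem.List.enumerate ((PySem.List.slice? seeds none none 2).getD [])).foldl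
      (fun acc p => acc ++ [(p.2, p.2 + PySem.List.pyGetD seeds (p.1 * 2 + 1) 0 - 1)]) []
    = ((((PySem.List.slice? seeds none none 2).getD []).zip
        ((PySem.List.slice? seeds (some 1) none 2).getD [])).map (fun p => (p.1, p.1 + p.2 - 1))) := by
  rw [slice_evens, slice_odds, PySem.List.foldl_append_singleton_eq_map]
  have hcc : (seeds.length + 1) / 2 = seeds.length / 2 := by omega
  rw [hcc, List.nil_append]
  apply List.ext_getElem
  · simp [PySem.List.length_enumerate]
  · intro i h1 h2'
    simp only [List.getElem_map, PySem.List.getElem_enumerate, List.getElem_zip, List.getElem_range]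
    have hidx : ((0 : Int) + (i : Int)) * 2 + 1 = ((2 * i + 1 : Nat) : Int) := by push_cast; ring
    rw [hidx, PySem.List.pyGetD_natCast]

-- head of the key-sorted list vs first minimum, across a permutation
theorem min_eq (lA lB : List (Int × Int)) (hp : lA.Perm lB) (hne : lB ≠ []) :
    (PySem.List.pyGet? (PySem.List.sorted lA (fun x => x.1)) 0).elim 0 (fun r => r.1)
      = (PySem.List.min? (lB.map (fun r => r.1)) (fun x => x)).getD 0 := by
  have hA : lA ≠ [] := fun h => hne (by simpa [h] using hp.symm)
  cases hs : PySem.List.sorted lA (fun x => x.1) with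
  | nil => exact absurd ((PySem.List.sorted_eq_nil_iff _ _ _).mp hs) hA
  | cons mhd t =>
    cases hm : PySem.List.min? (lB.map (fun r => r.1)) (fun x => x) with
    | none =>
      rw [PySem.List.min?_eq_none_iff] at hm
      simp at hm
      exact absurd hm hne
    | some mb =>
      simp only [PySem.List.pyGet?_zero_cons, Option.elim, Option.getD]
      have hmem : mhd ∈ lA := (PySem.List.mem_sorted _ _ _ _).mp (by rw [hs]; exact List.mem_cons_self)
      have h1 : mb ≤ mhd.1 :=
        PySem.List.min?_isMin hm mhd.1 (List.mem_map.mpr ⟨mhd, hp.mem_iff.mp hmem, rfl⟩)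
      have h2 : mhd.1 ≤ mb := by
        obtain ⟨y, hy, rfl⟩ := List.mem_map.mp (PySem.List.min?_mem hm)
        exact PySem.List.key_head_sorted_le lA (fun x => x.1) hs y (hp.mem_iff.mpr hy)
      omega

-- ===== VERDICT (by name: the statement is the Claim_ definition above) =====
theorem part2_spec : Claim_equal_part2 := by
  intro data _ hpre
  obtain ⟨seeds, maps⟩ := data
  obtain ⟨hne, h2, -⟩ := hpre
  unfold Spec_part2 part2 part2_alt
  simp only
  rw [init_eq seeds h2]
  refine min_eq _ _ (fold_perm maps _ _ (List.Perm.refl _)) (foldl_flat_ne_nil _ _ ?_)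
  rw [slice_evens, slice_odds]
  have : seeds.length ≠ 0 := fun h => hne (List.length_eq_zero_iff.mp h)
  simp only [ne_eq, ← List.length_eq_zero_iff, List.length_zip, List.length_map,
    List.length_range]
  have hl : (seeds, maps).1.length = seeds.length := rfl
  omega
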